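-- pv_equiv track=rewrite | github.com/Fondamenti18/fondamenti-di-programmazione | students/1803284/homework01/program02.py | decine
-- ===== SOURCE A (Python) =====
-- def decine(n_s):
--   l_0_9=['zero','uno','due','tre','quattro','cinque','sei','sette','otto','nove']
--   l_10_19=['dieci','undici','dodici','tredici','quattordici','quindici','sedici','diciassette','diciotto','diciannove']
--   l_20_90=['venti','trenta','quaranta','cinquanta','sessanta','settanta','ottanta','novanta',]
--   s=''
--   s_appo=''
--   t=n_s[-2:]
--   ln=len(t)
--   for i in range(0,10):
--     if int(t[0])==0 or ln==1:
--       if i==int(t):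
--         s=l_0_9[i]
--     elif int(t[0])==1:
--       if int(t[1])==i:
--         s=l_10_19[i]
--     elif int(t[0])==i:
--       if int(t[1])==0:
--         s=l_20_90[i-2]
--       else:
--         for j in range(1,10):
--           if int(t[1])==j:
--             if j==1 or j==8:
--               s_appo=l_20_90[i-2]
--               s=s_appo[:-1]+l_0_9[j]
--             else:
--               s=l_20_90[i-2]+l_0_9[j]
--   return s
-- ===== SOURCE B (Python) =====
-- def decine(n_s):
--   l_0_9=['zero','uno','due','tre','quattro','cinque','sei','sette','otto','nove']
--   l_10_19=['dieci','undici','dodici','tredici','quattordici','quindici','sedici','diciassette','diciotto','diciannove']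
--   l_20_90=['venti','trenta','quaranta','cinquanta','sessanta','settanta','ottanta','novanta']
--   words=l_0_9+l_10_19
--   for tens in l_20_90:
--     words.append(tens)
--     for u in range(1,10):
--       words.append((tens[:-1] if u in (1,8) else tens)+l_0_9[u])
--   return words[int(n_s[-2:])]
-- ===== Notes on version B (the rewrite author's own statement) =====
-- stated objective: alternative
-- what changed: A's nested fixed-range search loops matching digits case by case are replaced by building the complete 0-99 Italian word table once (l_0_9+l_10_19 plus a composition pass over the tens) and returning a single lookup words[int(n_s[-2:])].
import Mathlib
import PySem

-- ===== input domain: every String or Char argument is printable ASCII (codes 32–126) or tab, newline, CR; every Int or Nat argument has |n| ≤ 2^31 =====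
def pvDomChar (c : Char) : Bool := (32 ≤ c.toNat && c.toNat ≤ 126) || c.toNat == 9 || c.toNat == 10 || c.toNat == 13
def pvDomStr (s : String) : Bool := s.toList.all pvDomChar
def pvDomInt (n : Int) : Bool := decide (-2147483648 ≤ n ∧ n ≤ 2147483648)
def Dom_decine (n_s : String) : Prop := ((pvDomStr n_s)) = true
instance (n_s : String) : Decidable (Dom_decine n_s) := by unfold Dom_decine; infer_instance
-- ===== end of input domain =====

-- B replaces A's nested digit-matching search loops by building the full 0-99 word table once
-- and doing a single lookup words[int(n_s[-2:])]; objective: alternative (same cost, flat lookup).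


-- word tables (both Pythons define the same literal lists)
def pvL09 : List (List Char) :=
  ["zero".toList,"uno".toList,"due".toList,"tre".toList,"quattro".toList,
   "cinque".toList,"sei".toList,"sette".toList,"otto".toList,"nove".toList]
def pvL1019 : List (List Char) :=
  ["dieci".toList,"undici".toList,"dodici".toList,"tredici".toList,"quattordici".toList,
   "quindici".toList,"sedici".toList,"diciassette".toList,"diciotto".toList,"diciannove".toList]
def pvL2090 : List (List Char) :=
  ["venti".toList,"trenta".toList,"quaranta".toList,"cinquanta".toList,
   "sessanta".toList,"settanta".toList,"ottanta".toList,"novanta".toList]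

-- ===== PORT A =====
-- literal transliteration of A on the char list t = n_s[-2:] (Pre_ excludes every input where an
-- int(...) or t[0] would raise, so the .getD defaults are never the computed value inside Pre_)
def decineCoreA (t : List Char) : List Char :=
  let ln : Nat := t.length                                     -- ln = len(t)
  -- for i in range(0,10): state (s, s_appo)
  let res := (PySem.List.pyRange 0 10 1).foldl (fun (st : List Char × List Char) i =>
    let d0 := (PySem.Int.ofChars? [PySem.List.pyGetD t 0 ' ']).getD 0   -- int(t[0])
    if d0 == 0 || ln == 1 then
      if i == (PySem.Int.ofChars? t).getD 0 then                        -- i == int(t)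
        (PySem.List.pyGetD pvL09 i [], st.2)                            -- s = l_0_9[i]
      else st
    else if d0 == 1 then
      if (PySem.Int.ofChars? [PySem.List.pyGetD t 1 ' ']).getD 0 == i then   -- int(t[1]) == i
        (PySem.List.pyGetD pvL1019 i [], st.2)                          -- s = l_10_19[i]
      else st
    else if d0 == i then
      if (PySem.Int.ofChars? [PySem.List.pyGetD t 1 ' ']).getD 0 == 0 then   -- int(t[1]) == 0
        (PySem.List.pyGetD pvL2090 (i-2) [], st.2)                      -- s = l_20_90[i-2]
      else
        -- for j in range(1,10):
        (PySem.List.pyRange 1 10 1).foldl (fun (st2 : List Char × List Char) j =>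
          if (PySem.Int.ofChars? [PySem.List.pyGetD t 1 ' ']).getD 0 == j then
            if j == 1 || j == 8 then
              let sAppo := PySem.List.pyGetD pvL2090 (i-2) []           -- s_appo = l_20_90[i-2]
              (PySem.List.slice sAppo none (some (-1)) ++ PySem.List.pyGetD pvL09 j [], sAppo)  -- s = s_appo[:-1]+l_0_9[j]
            else
              (PySem.List.pyGetD pvL2090 (i-2) [] ++ PySem.List.pyGetD pvL09 j [], st2.2)      -- s = l_20_90[i-2]+l_0_9[j]
          else st2) st
    else st) ([], [])
  res.1

def decine (n_s : String) : String :=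
  String.ofList (decineCoreA (PySem.List.slice n_s.toList (some (-2)) none))   -- t = n_s[-2:]; return s

-- ===== PORT B =====
-- literal transliteration of Source B on the same char list t: build words[0..99] then index once
def decineCoreB (t : List Char) : List Char :=
  let words := pvL09 ++ pvL1019                                         -- words = l_0_9 + l_10_19
  let words := pvL2090.foldl (fun ws tens =>                            -- for tens in l_20_90:
    let ws := ws ++ [tens]                                              --   words.append(tens)
    (PySem.List.pyRange 1 10 1).foldl (fun ws2 u =>                     --   for u in range(1,10):
      ws2 ++ [(if u == 1 || u == 8 then PySem.List.slice tens none (some (-1)) else tens)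
              ++ PySem.List.pyGetD pvL09 u []]) ws) words               --     words.append(...)
  PySem.List.pyGetD words ((PySem.Int.ofChars? t).getD 0) []            -- return words[int(t)]

def decine_alt (n_s : String) : String :=
  String.ofList (decineCoreB (PySem.List.slice n_s.toList (some (-2)) none))

-- ===== PRECONDITION & SPEC =====
-- Pre_ = exactly the inputs where A returns: t = n_s[-2:] is nonempty, t[0] is a digit, and the
-- second char (if any) is a digit, or whitespace after a leading zero (then int(t) still parses).
def Pre_decine (n_s : String) : Prop :=
  let t := PySem.List.slice n_s.toList (some (-2)) none
  t ≠ [] ∧ (t.headD ' ').isDigit = true ∧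
    (t.length = 1 ∨ (t.getD 1 ' ').isDigit = true ∨
      (t.headD ' ' = '0' ∧ t.getD 1 ' ' ∈ [' ', '\t', '\n', '\r']))
instance (n_s : String) : Decidable (Pre_decine n_s) := by unfold Pre_decine; infer_instance
def pvWitness_decine : String := "99"

def Spec_decine (n_s : String) (out : String) : Prop := out = decine_alt n_s
instance (n_s : String) (out : String) : Decidable (Spec_decine n_s out) := by unfold Spec_decine; infer_instance

-- ===== CLAIM (what is proved, stated in full; the proofs are below) =====
def Claim_equal_decine : Prop := ∀ (n_s : String), Dom_decine n_s → Pre_decine n_s → Spec_decine n_s (decine n_s)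

-- ===== LEMMAS AND PROOFS =====
lemma digit_mem (c : Char) (h : c.isDigit = true) :
    c ∈ ['0','1','2','3','4','5','6','7','8','9'] := by
  simp [Char.isDigit] at h
  have h1 : 48 ≤ c.toNat := h.1
  have h2 : c.toNat ≤ 57 := h.2
  rw [← Char.ofNat_toNat c]
  interval_cases c.toNat <;> simp

lemma core_eq (t : List Char)
    (hne : t ≠ []) (h0 : (t.headD ' ').isDigit = true)
    (h1 : t.length = 1 ∨ (t.getD 1 ' ').isDigit = true ∨
      (t.headD ' ' = '0' ∧ t.getD 1 ' ' ∈ [' ', '\t', '\n', '\r']))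
    (hlen : t.length ≤ 2) :
    decineCoreA t = decineCoreB t := by
  match t with
  | [] => exact absurd rfl hne
  | [c0] =>
    have := digit_mem c0 (by simpa using h0)
    fin_cases this <;> decide
  | [c0, c1] =>
    have hm0 := digit_mem c0 (by simpa using h0)
    rcases h1 with h1 | h1 | h1
    · simp at h1
    · have hm1 := digit_mem c1 (by simpa using h1)
      fin_cases hm0 <;> fin_cases hm1 <;> decide
    · obtain ⟨hc0, hc1⟩ := h1
      simp only [List.headD, List.getD, List.getElem?_cons_succ, List.getElem?_cons_zero] at hc0 hc1
      subst hc0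
      fin_cases hc1 <;> decide
  | _ :: _ :: _ :: _ => simp at hlen

lemma slice_last_two_len (xs : List Char) :
    (PySem.List.slice xs (some (-2)) none).length ≤ 2 := by
  rcases Nat.lt_or_ge xs.length 2 with h | h
  · rw [PySem.List.slice_some_none,
      show PySem.List.clampIdx xs.length (-2) = 0 by simp [PySem.List.clampIdx]; omega]
    simpa using by omega
  · rw [PySem.List.slice_from_neg_ofNat xs 2 (by omega)]
    simp [List.length_drop]
    omega

-- ===== VERDICT (by name: the statement is the Claim_ definition above) =====
theorem decine_spec : Claim_equal_decine := by
  intro n_s _ hpre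
  obtain ⟨hne, h0, h1⟩ := hpre
  unfold Spec_decine decine decine_alt
  rw [core_eq _ hne h0 h1 (slice_last_two_len _)]
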